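-- pv_equiv track=rewrite | github.com/bubblesub/bubblesub | bubblesub/api/cmd.py | split_invocation
-- ===== SOURCE A (Python) =====
-- def split_invocation(invocation: str) -> list[list[str]]:
--     """Split invocation into name and arguments array.
--
--     :param invocation: command line to parse
--     :return: tuple containing command name and arguments
--     """
--     cmds: list[list[str]] = []
--     cmd: list[str] = []
--
--     invocation = invocation.strip()
--     while invocation:
--         char = invocation[0]
--         invocation = invocation[1:]
--
--         if char in "'\"":
--             while invocation:
--                 char2 = invocation[0]
--                 invocation = invocation[1:]
--                 if char2 == char:
--                     break
--                 if cmd: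
--                     cmd[-1] += char2
--                 else:
--                     cmd.append(char2)
--             continue
--
--         if char == ";":
--             cmds.append(cmd)
--             cmd = []
--             continue
--
--         if char in " \t":
--             cmd.append("")
--             continue
--
--         if cmd:
--             cmd[-1] += char
--         else:
--             cmd.append(char)
--
--     if cmd:
--         cmds.append(cmd)
--
--     return cmds
-- ===== SOURCE B (Python) =====
-- def split_invocation(invocation: str) -> list[list[str]]:
--     """Split invocation into name and arguments array.
--
--     :param invocation: command line to parse
--     :return: tuple containing command name and arguments
--     """
--     s = invocation.strip()
--     n = len(s)
--     cmds: list[list[str]] = []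
--     tokens: list[str] = []
--     cur = None  # the token currently being built, or None
--     i = 0
--     while i < n:
--         char = s[i]
--         i += 1
--         if char in "'\"":
--             # grab the whole quoted chunk at once
--             j = s.find(char, i)
--             if j < 0:
--                 content, i = s[i:], n
--             else:
--                 content, i = s[i:j], j + 1
--             if content:
--                 cur = ("" if cur is None else cur) + content
--         elif char == ";":
--             cmds.append(tokens + ([cur] if cur is not None else []))
--             tokens, cur = [], None
--         elif char in " \t":
--             if cur is not None:
--                 tokens.append(cur)
--             cur = ""
--         else:
--             cur = ("" if cur is None else cur) + char
--     if cur is not None: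
--         cmds.append(tokens + [cur])
--     return cmds
-- ===== Notes on version B (the rewrite author's own statement) =====
-- stated objective: faster
-- what changed: Replaces A's repeated invocation[1:] re-slicing and per-character last-element concatenation with a single integer-index scan that keeps finished tokens and the current token separately and extracts each quoted chunk in one find+slice.
import Mathlib
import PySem

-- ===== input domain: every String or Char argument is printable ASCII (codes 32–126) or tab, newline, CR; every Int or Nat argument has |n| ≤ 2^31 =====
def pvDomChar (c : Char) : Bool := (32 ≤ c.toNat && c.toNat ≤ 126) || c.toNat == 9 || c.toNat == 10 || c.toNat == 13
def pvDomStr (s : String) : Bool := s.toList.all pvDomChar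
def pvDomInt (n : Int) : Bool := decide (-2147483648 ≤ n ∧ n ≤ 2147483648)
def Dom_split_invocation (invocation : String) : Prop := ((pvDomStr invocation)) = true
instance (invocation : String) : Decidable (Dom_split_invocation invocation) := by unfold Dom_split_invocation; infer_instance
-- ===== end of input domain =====

-- B replaces A's repeated string re-slicing (quadratic) by a single left-to-right scan that
-- keeps finished tokens and the token under construction separately and grabs quoted text in one chunk.

-- ===== PORT A =====
-- tokens are kept as List Char (Python str of the pieces); the final result wraps them with String.ofList.

-- `if cmd: cmd[-1] += char  else: cmd.append(char)`
def pvAddChar (cmd : List (List Char)) (c : Char) : List (List Char) :=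
  match cmd with
  | [] => [[c]]
  | [t] => [t ++ [c]]
  | t :: ts => t :: pvAddChar ts c

-- the inner `while invocation:` loop after an opening quote: returns (rest of invocation, cmd)
def pvQuoteLoop (q : Char) (s : List Char) (cmd : List (List Char)) : List Char × List (List Char) :=
  match s with
  | [] => ([], cmd)
  | c :: rest => if c = q then (rest, cmd) else pvQuoteLoop q rest (pvAddChar cmd c)

theorem pvQuoteLoop_fst_len_le (q : Char) (s : List Char) (cmd : List (List Char)) :
    (pvQuoteLoop q s cmd).1.length ≤ s.length := by
  induction s generalizing cmd with
  | nil => simp [pvQuoteLoop]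
  | cons c rest ih =>
    simp only [pvQuoteLoop]
    split
    · simp
    · exact le_trans (ih _) (by simp)

-- the outer `while invocation:` loop plus the final `if cmd: cmds.append(cmd)`
def pvMainLoop (s : List Char) (cmds : List (List (List Char))) (cmd : List (List Char)) :
    List (List (List Char)) :=
  match s with
  | [] => if cmd = [] then cmds else cmds ++ [cmd]
  | c :: rest =>
    if c = '\'' ∨ c = '"' then
      let p := pvQuoteLoop c rest cmd
      pvMainLoop p.1 cmds p.2
    else if c = ';' then
      pvMainLoop rest (cmds ++ [cmd]) []
    else if c = ' ' ∨ c = '\t' then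
      pvMainLoop rest cmds (cmd ++ [[]])
    else
      pvMainLoop rest cmds (pvAddChar cmd c)
termination_by s.length
decreasing_by
  · exact Nat.lt_succ_of_le (pvQuoteLoop_fst_len_le c rest cmd)
  · simp
  · simp
  · simp

def split_invocation (invocation : String) : List (List String) :=
  (pvMainLoop (PySem.Chars.strip invocation.toList) [] []).map (·.map String.ofList)

-- ===== PORT B =====
-- B keeps the finished tokens and the token `cur` under construction (None = no token yet);
-- `s.find(char, i)` + slicing of the quoted chunk is ported as takeWhile/dropWhile on the
-- remaining suffix (exact: find scans for the first occurrence of the quote from i).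
def pvFlush (tokens : List (List Char)) (cur : Option (List Char)) : List (List Char) :=
  tokens ++ cur.toList

def pvBLoop (s : List Char) (cmds : List (List (List Char))) (tokens : List (List Char))
    (cur : Option (List Char)) : List (List (List Char)) :=
  match s with
  | [] =>
    match cur with
    | none => cmds
    | some v => cmds ++ [tokens ++ [v]]
  | c :: rest =>
    if c = '\'' ∨ c = '"' then
      let content := rest.takeWhile (· ≠ c)
      let rest' := (rest.dropWhile (· ≠ c)).tail
      let cur' := if content = [] then cur else some (cur.getD [] ++ content)
      pvBLoop rest' cmds tokens cur'
    else if c = ';' then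
      pvBLoop rest (cmds ++ [pvFlush tokens cur]) [] none
    else if c = ' ' ∨ c = '\t' then
      pvBLoop rest cmds (pvFlush tokens cur) (some [])
    else
      pvBLoop rest cmds tokens (some (cur.getD [] ++ [c]))
termination_by s.length
decreasing_by
  · have h1 : ((rest.dropWhile (· ≠ c)).tail).length ≤ (rest.dropWhile (· ≠ c)).length := by
      simp [List.length_tail]
    have h2 := List.length_dropWhile_le (· ≠ c) rest
    simp only [List.length_cons]; omega
  · simp
  · simp
  · simp

def split_invocation_alt (invocation : String) : List (List String) :=
  (pvBLoop (PySem.Chars.strip invocation.toList) [] [] none).map (·.map String.ofList)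

-- ===== PRECONDITION & SPEC =====
def Spec_split_invocation (invocation : String) (out : List (List String)) : Prop := out = split_invocation_alt invocation
instance (invocation : String) (out : List (List String)) : Decidable (Spec_split_invocation invocation out) := by unfold Spec_split_invocation; infer_instance

-- ===== CLAIM (what is proved, stated in full; the proofs are below) =====
def Claim_equal_split_invocation : Prop := ∀ (invocation : String), Dom_split_invocation invocation → Spec_split_invocation invocation (split_invocation invocation)

-- ===== LEMMAS AND PROOFS =====

-- cmd[-1] += c on a command of shape tokens ++ [last]
theorem pvAddChar_append_last (tokens : List (List Char)) (v : List Char) (c : Char) :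
    pvAddChar (tokens ++ [v]) c = tokens ++ [v ++ [c]] := by
  induction tokens with
  | nil => simp [pvAddChar]
  | cons t ts ih =>
    cases ts with
    | nil => simp [pvAddChar]
    | cons t' ts' => simp [pvAddChar] at ih ⊢; exact ih

-- fold pvAddChar over a chunk of characters
theorem pvFoldl_addChar_append_last (cs : List Char) (tokens : List (List Char)) (v : List Char) :
    List.foldl pvAddChar (tokens ++ [v]) cs = tokens ++ [v ++ cs] := by
  induction cs generalizing v with
  | nil => simp
  | cons c cs ih => simp [List.foldl, pvAddChar_append_last, ih]

theorem pvFoldl_addChar_flush (cs : List Char) (tokens : List (List Char))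
    (cur : Option (List Char)) (hinv : cur = none → tokens = []) :
    List.foldl pvAddChar (pvFlush tokens cur) cs =
      pvFlush tokens (if cs = [] then cur else some (cur.getD [] ++ cs)) := by
  cases cur with
  | some v => cases cs with
    | nil => simp
    | cons c cs' =>
      simp only [pvFlush, Option.toList_some, List.foldl, pvAddChar_append_last,
        pvFoldl_addChar_append_last]
      simp
  | none =>
    rw [hinv rfl]
    cases cs with
    | nil => simp
    | cons c cs' =>
      simp only [pvFlush, Option.toList_none, List.append_nil, List.foldl, pvAddChar]
      have := pvFoldl_addChar_append_last cs' [] [c]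
      simpa [pvFlush] using this

-- the quote loop consumes up to (and including) the matching quote and folds the content in
theorem pvQuoteLoop_eq (q : Char) (s : List Char) (cmd : List (List Char)) :
    pvQuoteLoop q s cmd =
      ((s.dropWhile (· ≠ q)).tail, List.foldl pvAddChar cmd (s.takeWhile (· ≠ q))) := by
  induction s generalizing cmd with
  | nil => simp [pvQuoteLoop]
  | cons c rest ih =>
    by_cases hc : c = q
    · subst hc; simp [pvQuoteLoop]
    · simp [pvQuoteLoop, hc, ih]

-- the two loops agree whenever A's cmd is B's tokens ++ cur and cur = none forces tokens = []
theorem pvLoop_eq (n : Nat) (s : List Char) (cmds : List (List (List Char)))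
    (tokens : List (List Char)) (cur : Option (List Char))
    (hn : s.length ≤ n) (hinv : cur = none → tokens = []) :
    pvMainLoop s cmds (pvFlush tokens cur) = pvBLoop s cmds tokens cur := by
  induction n generalizing s cmds tokens cur with
  | zero =>
    have : s = [] := List.length_eq_zero_iff.mp (Nat.le_zero.mp hn)
    subst this
    cases cur with
    | none => simp [pvMainLoop, pvBLoop, pvFlush, hinv rfl]
    | some v => simp [pvMainLoop, pvBLoop, pvFlush]
  | succ n ih =>
    cases s with
    | nil =>
      cases cur with
      | none => simp [pvMainLoop, pvBLoop, pvFlush, hinv rfl]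
      | some v => simp [pvMainLoop, pvBLoop, pvFlush]
    | cons c rest =>
      have hrest : rest.length ≤ n := by simpa using hn
      by_cases hq : c = '\'' ∨ c = '"'
      · rw [pvMainLoop, pvBLoop]
        simp only [hq, if_true]
        rw [pvQuoteLoop_eq, pvFoldl_addChar_flush _ _ _ hinv]
        have hlen : ((rest.dropWhile (· ≠ c)).tail).length ≤ n := by
          have h1 : ((rest.dropWhile (· ≠ c)).tail).length ≤ (rest.dropWhile (· ≠ c)).length := by
            simp [List.length_tail]
          have h2 := List.length_dropWhile_le (· ≠ c) rest
          omega
        refine ih _ _ _ _ hlen ?_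
        intro hnone
        split at hnone
        · exact hinv hnone
        · simp at hnone
      · by_cases hsemi : c = ';'
        · rw [pvMainLoop, pvBLoop]
          simp only [hsemi, if_true]
          have := ih rest (cmds ++ [pvFlush tokens cur]) [] none hrest (fun _ => rfl)
          simpa [pvFlush] using this
        · by_cases hws : c = ' ' ∨ c = '\t'
          · rw [pvMainLoop, pvBLoop]
            simp only [hq, if_false, hsemi, if_false, hws, if_true]
            have := ih rest cmds (pvFlush tokens cur) (some []) hrest (by simp)
            simpa [pvFlush] using this
          · rw [pvMainLoop, pvBLoop]
            simp only [hq, if_false, hsemi, if_false, hws, if_false]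
            have heq : pvAddChar (pvFlush tokens cur) c
                = pvFlush tokens (some (cur.getD [] ++ [c])) := by
              cases cur with
              | none => simp [pvFlush, hinv rfl, pvAddChar]
              | some v => simp [pvFlush, pvAddChar_append_last]
            rw [heq]
            exact ih rest cmds tokens (some (cur.getD [] ++ [c])) hrest (by simp)

-- ===== VERDICT (by name: the statement is the Claim_ definition above) =====
theorem split_invocation_spec : Claim_equal_split_invocation := by
  intro invocation _
  unfold Spec_split_invocation split_invocation split_invocation_alt
  exact congrArg (List.map (·.map String.ofList))
    (pvLoop_eq (PySem.Chars.strip invocation.toList).length _ _ [] none le_rfl (fun _ => rfl))
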